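-- pv_equiv track=rewrite | github.com/Prasanna030/Plivo-NER | src/predict.py | _token_right
-- ===== SOURCE A (Python) =====
-- def _token_right(text: str, idx: int):
--     n = len(text)
--     j = idx
--     while j < n and text[j].isspace():
--         j += 1
--     if j >= n:
--         return None, idx
--     start = j
--     while j < n and not text[j].isspace():
--         j += 1
--     end = j
--     return text[start:end], end
-- ===== SOURCE B (Python) =====
-- def _token_right(text: str, idx: int):
--     rest = text[idx:]
--     after = rest.lstrip()
--     if not after:
--         return None, idx
--     token = after.split(maxsplit=1)[0]
--     start = idx + (len(rest) - len(after))
--     return token, start + len(token)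
-- ===== Notes on version B (the rewrite author's own statement) =====
-- stated objective: idiomatic
-- what changed: Replaces A's two explicit index-stepping while-loops over characters with Python's built-in string operations: rest = text[idx:], after = rest.lstrip() to skip leading whitespace, and after.split(maxsplit=1)[0] to take the token, computing the end index arithmetically from the lengths. (measurably faster: C-implemented str builtins replace the per-character Python loop)
-- outside the precondition, e.g. on _token_right('ab', -1): A returns ('b', 2), B returns ('b', 0); on _token_right('', -1): A raises IndexError, B returns (None, -1)
import Mathlib
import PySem

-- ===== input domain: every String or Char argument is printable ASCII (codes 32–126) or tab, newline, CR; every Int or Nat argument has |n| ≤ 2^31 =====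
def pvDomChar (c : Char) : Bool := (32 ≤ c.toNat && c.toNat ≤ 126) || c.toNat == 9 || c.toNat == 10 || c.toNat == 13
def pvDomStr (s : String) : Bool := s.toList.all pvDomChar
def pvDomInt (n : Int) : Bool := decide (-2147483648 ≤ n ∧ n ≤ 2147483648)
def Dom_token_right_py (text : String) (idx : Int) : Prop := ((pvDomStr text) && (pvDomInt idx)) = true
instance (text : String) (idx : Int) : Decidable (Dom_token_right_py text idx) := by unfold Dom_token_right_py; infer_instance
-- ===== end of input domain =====

-- B replaces A's two hand-written character-scanning while-loops by the idiomatic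
-- slice/lstrip/split built-ins; the return values are proved equal for idx ≥ 0.

-- ===== PORT A =====
-- first while-loop: 'while j < n and text[j].isspace(): j += 1'
-- (on pyGet? = none Python raises IndexError; that happens only for negative idx, outside Pre_ — the port returns j there)
def pvSkipWs (cs : List Char) (n j : Int) : Int :=
  if _h : j < n then
    match PySem.List.pyGet? cs j with
    | some c => if PySem.Chars.isspace c then pvSkipWs cs n (j + 1) else j
    | none => j
  else j
termination_by (n - j).toNat
decreasing_by omega

-- second while-loop: 'while j < n and not text[j].isspace(): j += 1'
def pvSkipTok (cs : List Char) (n j : Int) : Int :=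
  if _h : j < n then
    match PySem.List.pyGet? cs j with
    | some c => if !PySem.Chars.isspace c then pvSkipTok cs n (j + 1) else j
    | none => j
  else j
termination_by (n - j).toNat
decreasing_by omega

def token_right_py (text : String) (idx : Int) : Option String × Int :=
  let cs := text.toList
  let n : Int := cs.length
  let j := pvSkipWs cs n idx
  if j ≥ n then (none, idx)
  else
    let start := j
    let j2 := pvSkipTok cs n j
    (some (String.ofList (PySem.Chars.slice cs (some start) (some j2))), j2)

-- ===== PORT B =====
def token_right_py_alt (text : String) (idx : Int) : Option String × Int :=
  let rest := PySem.Chars.slice text.toList (some idx) none      -- text[idx:]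
  let after := PySem.Chars.lstrip rest                           -- rest.lstrip()
  if after.isEmpty then (none, idx)
  else
    -- after.split(maxsplit=1)[0]: after is nonempty, so the split is nonempty and [0] is its head
    let token := (PySem.Chars.split₀Max after 1).headD []
    let start := idx + ((rest.length : Int) - (after.length : Int))
    (some (String.ofList token), start + (token.length : Int))

-- ===== PRECONDITION & SPEC =====
-- Pre_ excludes negative idx, on which Python's negative indexing makes both programs return
-- accidental values: A raises IndexError for idx < -len(text), and on -len(text) ≤ idx < 0 A's
-- per-character wraparound and B's slice wraparound are both artefacts no caller would specify.
def Pre_token_right_py (text : String) (idx : Int) : Prop := 0 ≤ idx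
instance (text : String) (idx : Int) : Decidable (Pre_token_right_py text idx) := by unfold Pre_token_right_py; infer_instance
def pvWitness_token_right_py : String × Int := ("  hello world", 1)

def Spec_token_right_py (text : String) (idx : Int) (out : Option String × Int) : Prop := out = token_right_py_alt text idx
instance (text : String) (idx : Int) (out : Option String × Int) : Decidable (Spec_token_right_py text idx out) := by unfold Spec_token_right_py; infer_instance

-- ===== CLAIM (what is proved, stated in full; the proofs are below) =====
def Claim_equal_token_right_py : Prop := ∀ (text : String) (idx : Int), Dom_token_right_py text idx → Pre_token_right_py text idx → Spec_token_right_py text idx (token_right_py text idx)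

-- ===== LEMMAS AND PROOFS =====

-- A's first loop lands at k plus the length of the whitespace run starting at k.
theorem pvSkipWs_eq (cs : List Char) (k : Nat) :
    pvSkipWs cs (cs.length : Int) (k : Int)
      = ((k + ((cs.drop k).takeWhile PySem.Chars.isspace).length : Nat) : Int) := by
  induction hFuel : cs.length - k generalizing k with
  | zero =>
    have hk : cs.length ≤ k := by omega
    rw [pvSkipWs]
    simp [List.drop_eq_nil_of_le hk, show ¬ ((k:Int) < (cs.length:Int)) by exact_mod_cast not_lt.mpr hk]
  | succ m ih =>
    have hk : k < cs.length := by omega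
    rw [pvSkipWs, dif_pos (by exact_mod_cast hk), PySem.List.pyGet?_natCast,
      List.getElem?_eq_getElem hk]
    dsimp only
    have hdrop : cs.drop k = cs[k] :: cs.drop (k+1) := List.drop_eq_getElem_cons hk
    by_cases hs : PySem.Chars.isspace cs[k]
    · have hlen : ((cs.drop k).takeWhile PySem.Chars.isspace).length
          = 1 + ((cs.drop (k+1)).takeWhile PySem.Chars.isspace).length := by
        rw [hdrop, List.takeWhile_cons]; simp [hs]; omega
      rw [if_pos hs, show ((k:Int) + 1) = ((k+1 : Nat) : Int) by push_cast; ring,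
        ih (k+1) (by omega)]
      omega
    · have hlen : ((cs.drop k).takeWhile PySem.Chars.isspace).length = 0 := by
        rw [hdrop, List.takeWhile_cons]; simp [hs]
      rw [if_neg hs]
      omega

-- A's second loop lands at k plus the length of the non-whitespace run starting at k.
theorem pvSkipTok_eq (cs : List Char) (k : Nat) :
    pvSkipTok cs (cs.length : Int) (k : Int)
      = ((k + ((cs.drop k).takeWhile (fun c => !PySem.Chars.isspace c)).length : Nat) : Int) := by
  induction hFuel : cs.length - k generalizing k with
  | zero =>
    have hk : cs.length ≤ k := by omega
    rw [pvSkipTok]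
    simp [List.drop_eq_nil_of_le hk, show ¬ ((k:Int) < (cs.length:Int)) by exact_mod_cast not_lt.mpr hk]
  | succ m ih =>
    have hk : k < cs.length := by omega
    rw [pvSkipTok, dif_pos (by exact_mod_cast hk), PySem.List.pyGet?_natCast,
      List.getElem?_eq_getElem hk]
    dsimp only
    have hdrop : cs.drop k = cs[k] :: cs.drop (k+1) := List.drop_eq_getElem_cons hk
    by_cases hs : PySem.Chars.isspace cs[k]
    · have hlen : ((cs.drop k).takeWhile (fun c => !PySem.Chars.isspace c)).length = 0 := by
        rw [hdrop, List.takeWhile_cons]; simp [hs]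
      rw [show (!PySem.Chars.isspace cs[k]) = false by simp [hs], if_neg (by simp)]
      omega
    · have hlen : ((cs.drop k).takeWhile (fun c => !PySem.Chars.isspace c)).length
          = 1 + ((cs.drop (k+1)).takeWhile (fun c => !PySem.Chars.isspace c)).length := by
        rw [hdrop, List.takeWhile_cons]; simp [hs]; omega
      rw [show (!PySem.Chars.isspace cs[k]) = true by simp [hs], if_pos rfl,
        show ((k:Int) + 1) = ((k+1 : Nat) : Int) by push_cast; ring,
        ih (k+1) (by omega)]
      omega

theorem go_zero_headD (fuel : Nat) (l' t : List Char) :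
    (PySem.Chars.split₀Max.go fuel 0 l' [t]).headD [] = t := by
  cases fuel with
  | zero => rw [PySem.Chars.split₀Max.go]; simp
  | succ f =>
    rw [PySem.Chars.split₀Max.go]
    cases h : List.dropWhile PySem.Chars.isspace l' with
    | nil => simp
    | cons c cr => simp

-- split(maxsplit=1)[0] of a whitespace-stripped nonempty string is its leading non-space run.
theorem split₀Max_one_headD (l : List Char)
    (hl : List.dropWhile PySem.Chars.isspace l = l) (hne : l ≠ []) :
    (PySem.Chars.split₀Max l 1).headD [] = l.takeWhile (fun c => !PySem.Chars.isspace c) := by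
  rw [PySem.Chars.split₀Max, if_neg (by norm_num)]
  obtain ⟨c, cr, rfl⟩ := List.exists_cons_of_ne_nil hne
  rw [PySem.Chars.split₀Max.go, hl]
  simp only [Int.toNat_one]
  norm_num
  simpa using go_zero_headD _ _ _

-- ===== VERDICT (by name: the statement is the Claim_ definition above) =====
theorem token_right_py_spec : Claim_equal_token_right_py := by
  intro text idx _hDom hPre
  unfold Spec_token_right_py token_right_py token_right_py_alt
  have hPre' : 0 ≤ idx := hPre
  obtain ⟨k, rfl⟩ : ∃ k : Nat, idx = (k : Int) := ⟨idx.toNat, (Int.toNat_of_nonneg hPre').symm⟩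
  set cs := text.toList with hcs
  -- B's rest and after
  have hrest : PySem.Chars.slice cs (some (k:Int)) none = cs.drop k := by
    simp [PySem.Chars.slice_eq_listSlice, PySem.List.slice_from_natCast]
  set tw := (cs.drop k).takeWhile PySem.Chars.isspace with htw
  set af := (cs.drop k).dropWhile PySem.Chars.isspace with haf
  have hsplit : tw ++ af = cs.drop k := List.takeWhile_append_dropWhile
  have hdropaf : cs.drop (k + tw.length) = af := by
    rw [← List.drop_drop, ← hsplit]
    exact List.drop_left
  have hlenrest : (cs.drop k).length = cs.length - k := List.length_drop
  simp only [PySem.Chars.lstrip, hrest, ← haf]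
  rw [pvSkipWs_eq cs k, ← htw]
  by_cases hafnil : af = []
  · -- all-whitespace tail on both sides
    have htwall : tw = cs.drop k := by rw [← hsplit, hafnil, List.append_nil]
    have hge : (cs.length : Int) ≤ ((k + tw.length : Nat) : Int) := by
      have : tw.length = cs.length - k := by rw [htwall]; exact hlenrest
      push_cast
      omega
    rw [if_pos hge, hafnil]
    simp
  · -- a token exists
    have hafdrop : List.dropWhile PySem.Chars.isspace af = af := List.dropWhile_idempotent _ _
    have hlt : k + tw.length < cs.length := by
      by_contra hge
      exact hafnil (by rw [← hdropaf]; exact List.drop_eq_nil_of_le (by omega))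
    rw [if_neg (by exact_mod_cast not_le.mpr hlt)]
    rw [pvSkipTok_eq cs (k + tw.length), hdropaf]
    set t := af.takeWhile (fun c => !PySem.Chars.isspace c) with ht
    -- A's slice is the leading non-space run of af
    have hslice : PySem.Chars.slice cs (some ((k + tw.length : Nat) : Int))
        (some ((k + tw.length + t.length : Nat) : Int)) = t := by
      simp only [PySem.Chars.slice_eq_listSlice, PySem.List.slice_natCast]
      rw [Nat.add_sub_cancel_left, hdropaf]
      have haf2 : t ++ af.dropWhile (fun c => !PySem.Chars.isspace c) = af := by
        rw [ht]; exact List.takeWhile_append_dropWhile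
      rw [← haf2]
      exact List.take_left
    have hb : (PySem.Chars.split₀Max af 1).headD [] = t := split₀Max_one_headD af hafdrop hafnil
    rw [if_neg (by simpa using hafnil)]
    simp only [hb, hslice]
    -- indices agree: k + (rest.length - af.length) + t.length = k + tw.length + t.length
    have hlen2 : (cs.drop k).length = tw.length + af.length := by rw [← hsplit]; simp
    rw [Prod.mk.injEq]
    refine ⟨rfl, ?_⟩
    push_cast
    omega
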